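-- pv_equiv track=rewrite | github.com/stenbein/AdventOfCode | 2017/day01/main.py | filter_on
-- ===== SOURCE A (Python) =====
-- def filter_on(seq, offset):
--     """taverse the sequence of digits in the captcha,
--     if the current digit is equal to the digit at the
--     offset, keep the digit for summation. The offset
--     can wrap"""
--
--     to_keep = []
--     arg_len = len(seq)
--
--     if arg_len < 2:
--         ValueError("Invalid series")
--
--     for i in range(arg_len):
--
--         if seq[i] == seq[int((i + offset) % arg_len)]:
--             to_keep.append(int(seq[i]))
--
--
--     return to_keep
-- ===== SOURCE B (Python) =====
-- def _gcd(a, b):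
--     while b:
--         a, b = b, a % b
--     return a
--
--
-- def filter_on(seq, offset):
--     """Decompose the shift-by-offset permutation of indices into its
--     gcd(n, r) cycles; walk each cycle once marking positions whose digit
--     equals its successor on the cycle in a boolean mask, then collect the
--     marked digits in index order."""
--     n = len(seq)
--     if n == 0:
--         return []
--     r = offset % n
--     g = _gcd(n, r)
--     match = [False] * n
--     for s in range(g):
--         j = s
--         for _ in range(n // g):
--             nxt = j + r
--             if nxt >= n:
--                 nxt -= n
--             if seq[j] == seq[nxt]:
--                 match[j] = True
--             j = nxt
--     return [int(seq[i]) for i in range(n) if match[i]]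
-- ===== Notes on version B (the rewrite author's own statement) =====
-- stated objective: alternative
-- what changed: B decomposes the shift-by-offset index permutation into its gcd(n,r) cycles, walks each cycle once comparing consecutive cycle elements into a boolean mask, and then collects the marked digits in a final pass, replacing A's single loop with a per-index modular lookup.
-- outside the precondition, e.g. on filter_on('aa', 1): A raises ValueError, B raises ValueError
import Mathlib
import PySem

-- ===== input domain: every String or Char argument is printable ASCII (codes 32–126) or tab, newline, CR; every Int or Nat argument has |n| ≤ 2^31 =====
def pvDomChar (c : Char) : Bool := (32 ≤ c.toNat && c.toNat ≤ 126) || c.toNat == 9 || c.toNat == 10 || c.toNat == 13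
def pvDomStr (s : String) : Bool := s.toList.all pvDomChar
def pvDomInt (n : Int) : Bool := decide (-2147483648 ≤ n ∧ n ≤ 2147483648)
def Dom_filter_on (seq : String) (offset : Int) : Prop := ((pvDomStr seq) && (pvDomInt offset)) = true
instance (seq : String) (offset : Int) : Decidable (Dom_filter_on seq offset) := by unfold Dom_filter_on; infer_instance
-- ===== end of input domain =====

-- B replaces A's per-index modular lookup by decomposing the shift-by-offset index
-- permutation into its gcd(n,r) cycles, walking each cycle once into a boolean mask,
-- then collecting the marked digits in a final pass (objective: alternative).

-- ===== PORT A =====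
-- index loop with modular lookup; int(seq[i]) is PySem.Int.ofChars? (getD 0 is unreachable inside Pre_)
def filter_on (seq : String) (offset : Int) : List Int :=
  let cs := seq.toList
  let arg_len : Int := PySem.Str.len seq
  (PySem.List.pyRange 0 arg_len 1).foldl
    (fun to_keep i =>
      match PySem.List.pyGet? cs i, PySem.List.pyGet? cs (PySem.Int.mod (i + offset) arg_len) with
      | some a, some b => if a = b then to_keep ++ [(PySem.Int.ofChars? [a]).getD 0] else to_keep
      | _, _ => to_keep)
    []

-- ===== PORT B =====
-- Euclid's gcd loop of Source B (while b: a, b = b, a % b); arguments are nonnegative Python ints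
def pyGcd (a b : Nat) : Nat :=
  if h : b = 0 then a else pyGcd b (a % b)
termination_by b
decreasing_by exact Nat.mod_lt _ (Nat.pos_of_ne_zero h)

-- cycle walk of Source B: mask ← cycles of j ↦ j+r (wrapped by one subtraction), then collect.
-- All loop variables are nonnegative, so they are carried as Nat (r = offset % n ≥ 0 since n > 0);
-- cs.getD j ' ' is seq[j], whose index is < n by the loop invariant, so the default is unreachable.
def filter_on_alt (seq : String) (offset : Int) : List Int :=
  let cs := seq.toList
  let n : Int := PySem.Str.len seq
  if n = 0 then []
  else
    let r : Nat := (PySem.Int.mod offset n).toNat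
    let g : Nat := pyGcd cs.length r
    let mask := (List.range g).foldl
      (fun mask s =>
        ((List.range (cs.length / g)).foldl
          (fun (p : List Bool × Nat) _ =>
            let j := p.2
            let nxt0 := j + r
            let nxt := if cs.length ≤ nxt0 then nxt0 - cs.length else nxt0
            ((if cs.getD j ' ' = cs.getD nxt ' ' then p.1.set j true else p.1), nxt))
          (mask, s)).1)
      (List.replicate cs.length false)
    (List.range cs.length).filterMap (fun i =>
      if mask.getD i false then some ((PySem.Int.ofChars? [cs.getD i ' ']).getD 0) else none)

-- ===== PRECONDITION & SPEC =====
-- Pre_ excludes exactly the inputs on which Python A raises ValueError: a position whose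
-- character equals the character at the wrapped offset but is not a digit, so int() fails.
def Pre_filter_on (seq : String) (offset : Int) : Prop :=
  ∀ i < seq.toList.length,
    seq.toList.getD i ' ' =
      seq.toList.getD (PySem.Int.mod ((i : Int) + offset) (seq.toList.length : Int)).toNat ' ' →
    (seq.toList.getD i ' ').isDigit = true
instance (seq : String) (offset : Int) : Decidable (Pre_filter_on seq offset) := by
  unfold Pre_filter_on; infer_instance
def pvWitness_filter_on : String × Int := ("91212129", 1)

def Spec_filter_on (seq : String) (offset : Int) (out : List Int) : Prop := out = filter_on_alt seq offset
instance (seq : String) (offset : Int) (out : List Int) : Decidable (Spec_filter_on seq offset out) := by unfold Spec_filter_on; infer_instance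

-- ===== CLAIM (what is proved, stated in full; the proofs are below) =====
def Claim_equal_filter_on : Prop := ∀ (seq : String) (offset : Int), Dom_filter_on seq offset → Pre_filter_on seq offset → Spec_filter_on seq offset (filter_on seq offset)

-- ===== LEMMAS AND PROOFS =====

-- the per-position keep condition both programs decide, and the kept value
def bcond (cs : List Char) (r j : Nat) : Bool :=
  decide (cs.getD j ' ' = cs.getD ((j + r) % cs.length) ' ')
def ival (cs : List Char) (j : Nat) : Int := (PySem.Int.ofChars? [cs.getD j ' ']).getD 0

-- the body of B's inner loop as a named step function (definitionally the port's)
def bstep (cs : List Char) (r : Nat) (p : List Bool × Nat) : List Bool × Nat :=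
  ((if cs.getD p.2 ' ' =
        cs.getD (if cs.length ≤ p.2 + r then p.2 + r - cs.length else p.2 + r) ' '
      then p.1.set p.2 true else p.1),
    if cs.length ≤ p.2 + r then p.2 + r - cs.length else p.2 + r)

-- Source B's gcd is gcd
lemma pyGcd_eq_gcd (a b : Nat) : pyGcd a b = Nat.gcd a b := by
  induction a, b using pyGcd.induct with
  | case1 a => rw [pyGcd]; simp
  | case2 a b h ih =>
    rw [pyGcd, dif_neg h, ih, Nat.gcd_comm b (a % b), ← Nat.gcd_rec b a, Nat.gcd_comm b a]

-- a fold that ignores its list element is an iterate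
lemma foldl_ignore {α β : Type} (g : α → α) (l : List β) (init : α) :
    l.foldl (fun p _ => g p) init = g^[l.length] init := by
  induction l generalizing init with
  | nil => rfl
  | cons x xs ih => simp [List.foldl_cons, ih, Function.iterate_succ_apply]

-- the single-subtraction wrap is mod
lemma nxt_eq_mod (cs : List Char) (r j : Nat) (hr : r < cs.length) (hj : j < cs.length) :
    (if cs.length ≤ j + r then j + r - cs.length else j + r) = (j + r) % cs.length := by
  split_ifs with h
  · rw [Nat.mod_eq_sub_mod h, Nat.mod_eq_of_lt (by omega)]
  · rw [Nat.mod_eq_of_lt (by omega)]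

-- getD after setting a valid position to true
lemma getD_set_true (m : List Bool) (j i : Nat) (hj : j < m.length) :
    (m.set j true).getD i false = true ↔ (i = j ∨ m.getD i false = true) := by
  by_cases h : i = j
  · subst h; simp [List.getD_eq_getElem?_getD, List.getElem?_set_self, hj]
  · simp [List.getD_eq_getElem?_getD, List.getElem?_set_ne (by omega : j ≠ i), h]

-- characterization of k iterations of B's inner step from start s
lemma inner_char (cs : List Char) (r : Nat) (hr : r < cs.length) :
    ∀ (k : Nat) (m : List Bool) (s : Nat), s < cs.length → m.length = cs.length →
      ((bstep cs r)^[k] (m, s)).1.length = cs.length ∧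
      ((bstep cs r)^[k] (m, s)).2 = (s + k * r) % cs.length ∧
      (∀ i, ((bstep cs r)^[k] (m, s)).1.getD i false = true ↔
        (m.getD i false = true ∨ ∃ t < k, (s + t * r) % cs.length = i ∧ bcond cs r i = true)) := by
  intro k
  induction k with
  | zero =>
    intro m s hs hm
    refine ⟨hm, by simpa using Nat.mod_eq_of_lt hs |>.symm, ?_⟩
    intro i; simp
  | succ k ih =>
    intro m s hs hm
    obtain ⟨hlen, hpos, hmask⟩ := ih m s hs hm
    set q := (bstep cs r)^[k] (m, s) with hq
    have hj : q.2 < cs.length := hpos ▸ Nat.mod_lt _ (by omega)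
    have hstep : (bstep cs r)^[k+1] (m, s) =
        ((if cs.getD q.2 ' ' = cs.getD ((q.2 + r) % cs.length) ' ' then q.1.set q.2 true else q.1),
          (q.2 + r) % cs.length) := by
      rw [Function.iterate_succ_apply']
      show bstep cs r q = _
      simp only [bstep]
      rw [nxt_eq_mod cs r q.2 hr hj]
    refine ⟨?_, ?_, ?_⟩
    · rw [hstep]; dsimp only; split_ifs <;> simp [hlen]
    · rw [hstep]; dsimp only
      rw [hpos, Nat.mod_add_mod]
      ring_nf
    · intro i
      rw [hstep]; dsimp only
      have hcnd : (cs.getD q.2 ' ' = cs.getD ((q.2 + r) % cs.length) ' ') ↔ bcond cs r q.2 = true := by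
        simp [bcond]
      constructor
      · intro h
        split_ifs at h with hc
        · rcases (getD_set_true q.1 q.2 i (hlen ▸ hj)).mp h with hij | hold
          · subst hij
            exact Or.inr ⟨k, by omega, by rw [← hpos], hcnd.mp hc⟩
          · rcases (hmask i).mp hold with h1 | ⟨t, ht, h2⟩
            · exact Or.inl h1
            · exact Or.inr ⟨t, by omega, h2⟩
        · rcases (hmask i).mp h with h1 | ⟨t, ht, h2⟩
          · exact Or.inl h1
          · exact Or.inr ⟨t, by omega, h2⟩
      · intro h
        have base : ∀ i, m.getD i false = true ∨
            (∃ t < k, (s + t * r) % cs.length = i ∧ bcond cs r i = true) →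
            q.1.getD i false = true := fun i h' => (hmask i).mpr h'
        rcases h with h1 | ⟨t, ht, hti, htc⟩
        · have := (hmask i).mpr (Or.inl h1)
          split_ifs with hc
          · exact (getD_set_true q.1 q.2 i (hlen ▸ hj)).mpr (Or.inr this)
          · exact this
        · by_cases htk : t < k
          · have := (hmask i).mpr (Or.inr ⟨t, htk, hti, htc⟩)
            split_ifs with hc
            · exact (getD_set_true q.1 q.2 i (hlen ▸ hj)).mpr (Or.inr this)
            · exact this
          · -- t = k : the new write
            have htk' : t = k := by omega
            subst htk'
            have hij : q.2 = i := by rw [hpos, hti]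
            have hc : cs.getD q.2 ' ' = cs.getD ((q.2 + r) % cs.length) ' ' := by
              rw [hij]; exact of_decide_eq_true htc
            rw [if_pos hc]
            exact (getD_set_true q.1 q.2 i (hlen ▸ hj)).mpr (Or.inl hij.symm)

-- characterization of the outer fold over cycle starts
lemma outer_char (cs : List Char) (r L : Nat) (hr : r < cs.length) :
    ∀ (ss : List Nat) (m : List Bool), (∀ s ∈ ss, s < cs.length) → m.length = cs.length →
      (ss.foldl (fun mask s => ((bstep cs r)^[L] (mask, s)).1) m).length = cs.length ∧
      (∀ i, (ss.foldl (fun mask s => ((bstep cs r)^[L] (mask, s)).1) m).getD i false = true ↔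
        (m.getD i false = true ∨
          ∃ s ∈ ss, ∃ t < L, (s + t * r) % cs.length = i ∧ bcond cs r i = true)) := by
  intro ss
  induction ss with
  | nil => intro m _ hm; exact ⟨hm, by simp⟩
  | cons s ss ih =>
    intro m hss hm
    have hs : s < cs.length := hss s (by simp)
    obtain ⟨hlen1, hpos1, hmask1⟩ := inner_char cs r hr L m s hs hm
    obtain ⟨hlen2, hmask2⟩ := ih _ (fun x hx => hss x (by simp [hx])) hlen1
    refine ⟨hlen2, ?_⟩
    intro i
    rw [List.foldl_cons, hmask2 i]
    rw [hmask1 i]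
    constructor
    · rintro ((h | ⟨t, ht, h1, h2⟩) | ⟨s', hs', t, ht, h1, h2⟩)
      · exact Or.inl h
      · exact Or.inr ⟨s, by simp, t, ht, h1, h2⟩
      · exact Or.inr ⟨s', by simp [hs'], t, ht, h1, h2⟩
    · rintro (h | ⟨s', hs', t, ht, h1, h2⟩)
      · exact Or.inl (Or.inl h)
      · rcases List.mem_cons.mp hs' with rfl | hs''
        · exact Or.inl (Or.inr ⟨t, ht, h1, h2⟩)
        · exact Or.inr ⟨s', hs'', t, ht, h1, h2⟩

-- number theory: the gcd(n,r) cycles of j ↦ (j+r) mod n cover every index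
lemma coverage (n r : Nat) (hn : 0 < n) (hr : r < n) (i : Nat) (hi : i < n) :
    ∃ s < Nat.gcd n r, ∃ t < n / Nat.gcd n r, (s + t * r) % n = i := by
  set g := Nat.gcd n r with hg
  have hgpos : 0 < g := Nat.gcd_pos_of_pos_left r hn
  have hgn : g ∣ n := Nat.gcd_dvd_left n r
  have hgr : g ∣ r := Nat.gcd_dvd_right n r
  set L := n / g with hL
  have hLpos : 0 < L := Nat.div_pos (Nat.le_of_dvd hn hgn) hgpos
  set s := i % g with hs
  set qn := i / g with hqn
  have hsg : s < g := Nat.mod_lt _ hgpos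
  have hiq : g * qn + s = i := Nat.div_add_mod i g
  -- Bezout over Int
  set u : Int := Nat.gcdA n r with hu
  set v : Int := Nat.gcdB n r with hv
  have hbez : (g : Int) = n * u + r * v := Nat.gcd_eq_gcd_ab n r
  -- the cycle period: n ∣ L * r
  have hLr : (L : Nat) * r = n * (r / g) := by
    obtain ⟨a, ha⟩ := hgn
    obtain ⟨b, hb⟩ := hgr
    have hLa : L = a := by rw [hL, ha, Nat.mul_div_cancel_left _ hgpos]
    have hrb : r / g = b := by rw [hb, Nat.mul_div_cancel_left _ hgpos]
    rw [hLa, hrb, ha, hb]; ring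
  -- choose t = (v * qn) mod L
  set tZ : Int := (v * (qn : Int)) % (L : Int) with htZ
  have hLZ : (0 : Int) < (L : Int) := by exact_mod_cast hLpos
  have htZ0 : 0 ≤ tZ := Int.emod_nonneg _ (by omega)
  have htZL : tZ < (L : Int) := Int.emod_lt_of_pos _ hLZ
  set t := tZ.toNat with ht
  have htL : t < L := by omega
  refine ⟨s, hsg, t, htL, ?_⟩
  -- show (s + t*r) ≡ i (mod n) over Int, then transfer
  have hdvd : (n : Int) ∣ ((t : Int) * r - (g : Int) * qn) := by
    have h1 : (t : Int) - v * qn = -((L : Int) * ((v * qn) / (L : Int))) := by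
      have := Int.ediv_add_emod (v * (qn : Int)) (L : Int)
      have htv : (t : Int) = tZ := Int.toNat_of_nonneg htZ0
      rw [htv, htZ]; omega
    have h2 : (t : Int) * r - (g : Int) * qn
        = ((t : Int) - v * qn) * r + qn * ((r : Int) * v - g) := by ring
    rw [h2, h1]
    have hd1 : (n : Int) ∣ -((L : Int) * ((v * qn) / (L : Int))) * r := by
      have hnLr : (n : Int) ∣ (L : Int) * r := ⟨(r / g : Nat), by exact_mod_cast hLr⟩
      have hre : -((L : Int) * ((v * qn) / (L : Int))) * r
          = ((L : Int) * r) * (-((v * qn) / (L : Int))) := by ring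
      rw [hre]; exact hnLr.mul_right _
    have hd2 : (n : Int) ∣ qn * ((r : Int) * v - g) := by
      have : (r : Int) * v - g = -(n * u) := by omega
      rw [this]; exact ⟨-(qn * u), by ring⟩
    exact dvd_add hd1 hd2
  rcases hdvd with ⟨K, hK⟩
  have hInt : ((s + t * r : Nat) : Int) = (i : Int) + n * K := by
    push_cast
    have : (g : Int) * qn + s = i := by exact_mod_cast hiq
    omega
  have : ((s + t * r : Nat) : Int) % (n : Int) = (i : Int) := by
    rw [hInt, Int.add_mul_emod_self_left, Int.emod_eq_of_lt (by omega) (by exact_mod_cast hi)]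
  have hfin : (((s + t * r) % n : Nat) : Int) = (i : Int) := by
    rw [Int.natCast_mod]; exact this
  exact_mod_cast hfin

-- glue: a filterMap whose body is `if b then some (f x) else none` is map-after-filter
lemma filterMap_bif_eq_map_filter {α β : Type} (p : α → Bool) (f : α → β) (l : List α) :
    l.filterMap (fun x => if p x then some (f x) else none) = (l.filter p).map f := by
  induction l with
  | nil => rfl
  | cons x xs ih => by_cases h : p x <;> simp [h, ih]

-- the main equality, unconditionally
lemma filter_on_eq (seq : String) (offset : Int) :
    filter_on seq offset = filter_on_alt seq offset := by
  unfold filter_on filter_on_alt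
  simp only [PySem.Str.len_eq]
  rcases Nat.eq_zero_or_pos seq.toList.length with h0 | hpos
  · rw [List.length_eq_zero_iff] at h0
    simp [h0, PySem.List.pyRange]
  · set cs := seq.toList with hcs
    set m := cs.length with hm
    have hmpos : (0 : Int) < (m : Int) := by exact_mod_cast hpos
    rw [if_neg (by omega)]
    have hr0 : 0 ≤ PySem.Int.mod offset (m : Int) := PySem.Int.mod_nonneg offset hmpos
    have hrlt : PySem.Int.mod offset (m : Int) < (m : Int) := PySem.Int.mod_lt offset hmpos
    set r := (PySem.Int.mod offset (m : Int)).toNat with hrdef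
    have hrm : r < m := by omega
    -- ===== A side: index loop → filter/map over range m =====
    rw [PySem.List.pyRange_zero_nat m, List.foldl_map]
    rw [PySem.List.foldl_congr_mem (List.range m) _
      (fun acc i => if bcond cs r i = true then acc ++ [ival cs i] else acc) []
      (by
        intro acc i hi
        have him : i < m := List.mem_range.mp hi
        rw [PySem.List.pyGet?_ofNat cs i him]
        have hidx : PySem.Int.mod ((i : Int) + offset) (m : Int) = (((i + r) % m : Nat) : Int) := by
          rw [PySem.Int.mod_eq_emod_of_pos hmpos]
          have hre : (r : Int) = offset % (m : Int) := by
            rw [hrdef, PySem.Int.mod_eq_emod_of_pos hmpos]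
            exact Int.toNat_of_nonneg (Int.emod_nonneg offset (by omega))
          push_cast
          rw [hre, Int.add_emod, Int.add_emod ((i : Nat) : Int) (offset % (m : Int)),
            Int.emod_emod_of_dvd offset dvd_rfl]
        rw [hidx, PySem.List.pyGet?_natCast]
        rw [List.getElem?_eq_getElem (show (i + r) % m < cs.length by exact Nat.mod_lt _ (by omega))]
        simp only [bcond, ival, ← hm]
        simp [List.getD_eq_getElem?_getD, List.getElem?_eq_getElem him,
          List.getElem?_eq_getElem (show (i + r) % m < cs.length from Nat.mod_lt _ (by omega))])]
    rw [PySem.List.foldl_append_if (fun i => bcond cs r i) (fun i => ival cs i) (List.range m) []]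
    rw [List.nil_append]
    -- ===== B side: mask characterization =====
    rw [pyGcd_eq_gcd]
    set g := Nat.gcd m r with hg
    have hgpos : 0 < g := Nat.gcd_pos_of_pos_left r hpos
    set L := m / g with hL
    have hbody : (fun (p : List Bool × Nat) (_ : Nat) =>
        ((if cs.getD p.2 ' ' = cs.getD (if m ≤ p.2 + r then p.2 + r - m else p.2 + r) ' '
            then p.1.set p.2 true else p.1),
          if m ≤ p.2 + r then p.2 + r - m else p.2 + r))
        = fun (p : List Bool × Nat) (_ : Nat) => bstep cs r p := rfl
    rw [hbody]
    have hiter : ∀ (mask : List Bool) (s : Nat),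
        (List.range L).foldl (fun p _ => bstep cs r p) (mask, s) = (bstep cs r)^[L] (mask, s) := by
      intro mask s
      rw [foldl_ignore (bstep cs r), List.length_range]
    have hfold : (fun (mask : List Bool) (s : Nat) =>
          ((List.range L).foldl (fun p _ => bstep cs r p) (mask, s)).1)
        = fun mask s => ((bstep cs r)^[L] (mask, s)).1 := by
      funext mask s; rw [hiter]
    rw [hfold]
    have hrm' : r < cs.length := by omega
    obtain ⟨hMlen, hMc⟩ := outer_char cs r L hrm' (List.range g) (List.replicate m false)
      (fun s hs => by
        have h1 := List.mem_range.mp hs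
        have hgm : g ≤ m := Nat.gcd_le_left _ hpos
        omega) (by simp [hm])
    rw [List.filterMap_congr (g := fun i => if bcond cs r i = true then some (ival cs i) else none)
      (by
        intro x hx
        have hxm : x < m := List.mem_range.mp hx
        have hrep : (List.replicate m false).getD x false ≠ true := by
          simp [List.getD_eq_getElem?_getD, List.getElem?_replicate, hxm]
        have hMx : (((List.range g).foldl (fun mask s => ((bstep cs r)^[L] (mask, s)).1)
            (List.replicate m false)).getD x false) = bcond cs r x := by
          by_cases hb : bcond cs r x = true
          · rw [hb]
            apply (hMc x).mpr
            right
            obtain ⟨s, hsg, t, htL, h1⟩ := coverage m r hpos hrm x hxm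
            exact ⟨s, List.mem_range.mpr hsg, t, htL, h1, hb⟩
          · rw [Bool.not_eq_true] at hb
            rw [hb]
            rw [Bool.eq_false_iff]
            intro hT
            rcases (hMc x).mp hT with h1 | ⟨_, _, _, _, _, h2⟩
            · exact hrep h1
            · rw [hb] at h2; exact Bool.false_ne_true h2
        rw [hMx]
        rfl)]
    rw [filterMap_bif_eq_map_filter (fun i => bcond cs r i) (fun i => ival cs i) (List.range m)]

-- ===== VERDICT (by name: the statement is the Claim_ definition above) =====
theorem filter_on_spec : Claim_equal_filter_on := by
  intro seq offset _ _
  unfold Spec_filter_on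
  exact filter_on_eq seq offset
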